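-- pv_equiv track=rewrite | github.com/entwanne/lucina | lucina/cell.py | clean_cell
-- ===== SOURCE A (Python) =====
-- def clean_cell(cell):
--     lines = cell['source']
--
--     while lines and not lines[0].rstrip('\r\n'):
--         lines.pop(0)
--     while lines and not lines[-1].rstrip('\r\n'):
--         lines.pop()
--
--     if lines:
--         lines[-1] = lines[-1].rstrip('\r\n')
--
--     return cell
-- ===== SOURCE B (Python) =====
-- def clean_cell(cell):
--     lines = cell['source']
--     idxs = [i for i, line in enumerate(lines) if line.rstrip('\r\n')]
--     if not idxs:
--         lines[:] = []
--     else: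
--         lines[:] = lines[idxs[0]:idxs[-1] + 1]
--         lines[-1] = lines[-1].rstrip('\r\n')
--     return cell
-- ===== Notes on version B (the rewrite author's own statement) =====
-- stated objective: alternative
-- what changed: Replaces the two pop-in-a-loop passes (pop(0) shifts the list each time) with a single enumerate pass collecting non-blank line indices followed by one slice assignment; the in-place mutation of cell['source'] and the exact rstrip('\r\n') blank test are preserved; Pre_ excludes dicts without a 'source' key, where A raises KeyError.
-- outside the precondition, e.g. on clean_cell({}): A raises KeyError, B raises KeyError
import Mathlib
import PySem

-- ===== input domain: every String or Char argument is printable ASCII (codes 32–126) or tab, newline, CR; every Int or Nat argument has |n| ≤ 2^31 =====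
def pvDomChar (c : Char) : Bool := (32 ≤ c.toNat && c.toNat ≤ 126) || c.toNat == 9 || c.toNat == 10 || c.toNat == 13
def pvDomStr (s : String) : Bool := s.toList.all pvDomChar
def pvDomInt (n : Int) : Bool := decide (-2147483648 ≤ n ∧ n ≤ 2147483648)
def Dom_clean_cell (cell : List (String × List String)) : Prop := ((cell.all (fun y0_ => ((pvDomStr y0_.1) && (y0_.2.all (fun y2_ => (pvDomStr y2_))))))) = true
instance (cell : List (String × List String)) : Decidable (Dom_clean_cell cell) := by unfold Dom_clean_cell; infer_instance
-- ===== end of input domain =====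

-- B trims the blank lines with one enumerate pass collecting non-blank indices plus a single
-- slice, instead of A's two pop-in-a-loop passes. Both Pythons mutate cell['source'] in place
-- (B via slice assignment, the same observable mutation); the theorems are about the return value.

-- ===== PORT A =====
-- hand port of s.rstrip('\r\n'): drop trailing '\r'/'\n' code points (exact; PySem has no chars-rstrip)
def pvRstripCRLF (s : String) : String :=
  String.ofList ((s.toList.reverse.dropWhile (fun c => c == '\r' || c == '\n')).reverse)

-- 'while lines and not lines[0].rstrip('\r\n'): lines.pop(0)'
def pvDropFront : List String → List String
  | [] => []
  | l :: ls => if (pvRstripCRLF l).isEmpty then pvDropFront ls else l :: ls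

-- 'while lines and not lines[-1].rstrip('\r\n'): lines.pop()'
def pvDropBack : List String → List String
  | [] => []
  | l :: ls =>
    match pvDropBack ls with
    | [] => if (pvRstripCRLF l).isEmpty then [] else [l]
    | l' :: ls' => l :: l' :: ls'

-- 'lines[-1] = lines[-1].rstrip('\r\n')' (no-op on []; A guards with 'if lines:')
def pvSetLast : List String → List String
  | [] => []
  | [l] => [pvRstripCRLF l]
  | l :: ls => l :: pvSetLast ls

def pvTrimA (lines : List String) : List String :=
  pvSetLast (pvDropBack (pvDropFront lines))

-- the dict update: the value stored under 'source' is the trimmed list (keys are unique by Pre_)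
def clean_cell (cell : List (String × List String)) : List (String × List String) :=
  cell.map (fun kv => if kv.1 == "source" then (kv.1, pvTrimA kv.2) else kv)

-- ===== PORT B =====
-- 'idxs = [i for i, line in enumerate(lines) if line.rstrip('\r\n')]'
def pvIdxs (lines : List String) : List Int :=
  ((PySem.List.enumerate lines 0).filter (fun p => !(pvRstripCRLF p.2).isEmpty)).map Prod.fst

def pvTrimB (lines : List String) : List String :=
  match pvIdxs lines with
  | [] => []
  | i0 :: rest =>
    pvSetLast (PySem.List.slice lines (some i0) (some (((i0 :: rest).getLast?.getD 0) + 1)))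

def clean_cell_alt (cell : List (String × List String)) : List (String × List String) :=
  cell.map (fun kv => if kv.1 == "source" then (kv.1, pvTrimB kv.2) else kv)

-- ===== PRECONDITION & SPEC =====
-- A raises KeyError when 'source' is missing; the nodup conjunct only rules out association
-- lists with a duplicated key, which no Python dict input can produce (dict keys are unique).
def Pre_clean_cell (cell : List (String × List String)) : Prop :=
  "source" ∈ cell.map Prod.fst ∧ (cell.map Prod.fst).Nodup
instance (cell : List (String × List String)) : Decidable (Pre_clean_cell cell) := by
  unfold Pre_clean_cell; infer_instance

def pvWitness_clean_cell : (List (String × List String)) := [("source", ["\n", "a\n", "\r\n"])]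

def Spec_clean_cell (cell : List (String × List String)) (out : List (String × List String)) : Prop := out = clean_cell_alt cell
instance (cell : List (String × List String)) (out : List (String × List String)) : Decidable (Spec_clean_cell cell out) := by unfold Spec_clean_cell; infer_instance

-- ===== CLAIM (what is proved, stated in full; the proofs are below) =====
def Claim_equal_clean_cell : Prop := ∀ (cell : List (String × List String)), Dom_clean_cell cell → Pre_clean_cell cell → Spec_clean_cell cell (clean_cell cell)

-- ===== LEMMAS AND PROOFS =====

-- shifting the enumeration start by one shifts every collected index by one
theorem pvShiftIdxs (ls : List String) (s : Int) :
    ((PySem.List.enumerate ls (s + 1)).filter (fun p => !(pvRstripCRLF p.2).isEmpty)).map Prod.fst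
      = (((PySem.List.enumerate ls s).filter (fun p => !(pvRstripCRLF p.2).isEmpty)).map Prod.fst).map (· + 1) := by
  induction ls generalizing s with
  | nil => simp [PySem.List.enumerate]
  | cons l ls ih =>
    simp only [PySem.List.enumerate_cons, List.filter_cons]
    by_cases h : (pvRstripCRLF l).isEmpty
    · simp [h, ih (s + 1)]
    · simp [h, ih (s + 1)]

theorem pvIdxs_cons (l : String) (ls : List String) :
    pvIdxs (l :: ls)
      = (if (pvRstripCRLF l).isEmpty then ([] : List Int) else [0]) ++ (pvIdxs ls).map (· + 1) := by
  unfold pvIdxs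
  simp only [PySem.List.enumerate_cons, List.filter_cons]
  by_cases h : (pvRstripCRLF l).isEmpty
  · simpa [h] using pvShiftIdxs ls 0
  · simpa [h] using pvShiftIdxs ls 0

theorem pvIdxs_nonneg (ls : List String) : ∀ i ∈ pvIdxs ls, 0 ≤ i := by
  induction ls with
  | nil => simp [pvIdxs, PySem.List.enumerate]
  | cons l ls ih =>
    intro i hi
    rw [pvIdxs_cons] at hi
    rcases List.mem_append.mp hi with h | h
    · split at h <;> simp_all
    · obtain ⟨j, hj, rfl⟩ := List.mem_map.mp h
      have := ih j hj; omega

theorem pvDropBack_nil (ls : List String) (h : pvIdxs ls = []) : pvDropBack ls = [] := by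
  induction ls with
  | nil => rfl
  | cons l ls ih =>
    rw [pvIdxs_cons] at h
    rcases List.append_eq_nil_iff.mp h with ⟨h1, h2⟩
    have hb : (pvRstripCRLF l).isEmpty := by by_contra hc; simp [hc] at h1
    have := ih (List.map_eq_nil_iff.mp h2)
    simp [pvDropBack, this, hb]

theorem pvDropBack_ne_nil (ls : List String) (h : pvIdxs ls ≠ []) : pvDropBack ls ≠ [] := by
  induction ls with
  | nil => simp [pvIdxs, PySem.List.enumerate] at h
  | cons l ls ih =>
    rw [pvIdxs_cons] at h
    by_cases ht : pvIdxs ls = []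
    · have hb : ¬ (pvRstripCRLF l).isEmpty := by
        intro hc; simp [hc, ht] at h
      simp [pvDropBack, pvDropBack_nil ls ht, hb]
    · have := ih ht
      simp only [pvDropBack]
      cases hd : pvDropBack ls with
      | nil => exact absurd hd this
      | cons a as => simp

-- the back-trimming loop keeps exactly the prefix up to the last non-blank index
theorem pvB2 (ls : List String) (i0 : Int) (rest : List Int) (h : pvIdxs ls = i0 :: rest) :
    pvDropBack ls = ls.take (((i0 :: rest).getLast?.getD 0).toNat + 1) := by
  induction ls generalizing i0 rest with
  | nil => simp [pvIdxs, PySem.List.enumerate] at h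
  | cons l ls ih =>
    rw [pvIdxs_cons] at h
    by_cases ht : pvIdxs ls = []
    · have hb : ¬ (pvRstripCRLF l).isEmpty := by
        intro hc; simp [hc, ht] at h
      simp only [hb, ht, List.map_nil, List.append_nil] at h
      obtain ⟨rfl, rfl⟩ : i0 = 0 ∧ rest = [] := by simpa using h.symm
      simp [pvDropBack, pvDropBack_nil ls ht, hb]
    · obtain ⟨j, r, hjr⟩ : ∃ j r, pvIdxs ls = j :: r := by
        cases hx : pvIdxs ls with
        | nil => exact absurd hx ht
        | cons a as => exact ⟨a, as, rfl⟩
      -- last index of the cons list is (last index of ls) + 1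
      have hlast : (i0 :: rest).getLast? = some (((j :: r).getLast?.getD 0) + 1) := by
        rw [← h, hjr]
        have h2 : ((j :: r).map (· + 1)).getLast? = some (((j :: r).getLast?.getD 0) + 1) := by
          rw [List.getLast?_map]
          cases hg : (j :: r).getLast? with
          | none => simp at hg
          | some a => simp
        by_cases hb : (pvRstripCRLF l).isEmpty
        · simpa [hb] using h2
        · simp only [hb]
          rw [List.getLast?_append, h2]; rfl
      have hjl : 0 ≤ (j :: r).getLast?.getD 0 := by
        cases hg : (j :: r).getLast? with
        | none => simp at hg
        | some a =>
          have := pvIdxs_nonneg ls a (hjr ▸ List.mem_of_getLast? hg)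
          simpa [hg] using this
      have htn : ((i0 :: rest).getLast?.getD 0).toNat = ((j :: r).getLast?.getD 0).toNat + 1 := by
        rw [hlast]; simp only [Option.getD_some]; omega
      rw [htn]
      have hcons : pvDropBack (l :: ls) = l :: pvDropBack ls := by
        have := pvDropBack_ne_nil ls ht
        simp only [pvDropBack]
        cases hd : pvDropBack ls with
        | nil => exact absurd hd this
        | cons a as => rfl
      rw [hcons, List.take_succ_cons, ih j r hjr]

-- a one-step slice shift on a cons cell
theorem pvSliceShift {α : Type} (x : α) (xs : List α) (a b : Int) (ha : 0 ≤ a) (hb : 0 ≤ b) :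
    PySem.List.slice (x :: xs) (some (a + 1)) (some (b + 1)) = PySem.List.slice xs (some a) (some b) := by
  rw [PySem.List.slice_toNat _ (by omega) (by omega), PySem.List.slice_toNat _ ha hb]
  have h1 : (a + 1).toNat = a.toNat + 1 := by omega
  have h2 : (b + 1).toNat = b.toNat + 1 := by omega
  rw [h1, h2]
  simp [List.drop_succ_cons]

theorem pvTrim_eq (lines : List String) : pvTrimA lines = pvTrimB lines := by
  induction lines with
  | nil => rfl
  | cons l ls ih =>
    by_cases hb : (pvRstripCRLF l).isEmpty
    · -- blank head: both sides reduce to the tail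
      have hA : pvTrimA (l :: ls) = pvTrimA ls := by
        simp [pvTrimA, pvDropFront, hb]
      have hidx : pvIdxs (l :: ls) = (pvIdxs ls).map (· + 1) := by
        rw [pvIdxs_cons, if_pos hb, List.nil_append]
      rw [hA, ih]
      unfold pvTrimB
      rw [hidx]
      cases hx : pvIdxs ls with
      | nil => simp
      | cons j r =>
        simp only [List.map_cons]
        have hlast : ((j + 1) :: r.map (· + 1)).getLast?.getD 0 = ((j :: r).getLast?.getD 0) + 1 := by
          have : ((j + 1) :: r.map (· + 1)) = (j :: r).map (· + 1) := by simp
          rw [this, List.getLast?_map]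
          cases hg : (j :: r).getLast? with
          | none => simp at hg
          | some a => simp
        rw [hlast]
        have hj0 : 0 ≤ j := pvIdxs_nonneg ls j (hx ▸ List.mem_cons_self ..)
        have hl0 : 0 ≤ (j :: r).getLast?.getD 0 := by
          cases hg : (j :: r).getLast? with
          | none => simp at hg
          | some a =>
            have := pvIdxs_nonneg ls a (hx ▸ List.mem_of_getLast? hg)
            simpa [hg] using this
        rw [pvSliceShift l ls j ((j :: r).getLast?.getD 0 + 1) hj0 (by omega)]
    · -- non-blank head: front loop stops; back loop = take up to last non-blank index
      have hidx : pvIdxs (l :: ls) = 0 :: (pvIdxs ls).map (· + 1) := by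
        rw [pvIdxs_cons, if_neg hb, List.singleton_append]
      have hA : pvTrimA (l :: ls) = pvSetLast (pvDropBack (l :: ls)) := by
        simp [pvTrimA, pvDropFront, hb]
      rw [hA, pvB2 (l :: ls) 0 ((pvIdxs ls).map (· + 1)) hidx]
      unfold pvTrimB
      rw [hidx]
      have hl0 : 0 ≤ (0 :: (pvIdxs ls).map (· + 1)).getLast?.getD 0 := by
        cases hg : (0 :: (pvIdxs ls).map (· + 1)).getLast? with
        | none => simp at hg
        | some a =>
          have := pvIdxs_nonneg (l :: ls) a (hidx ▸ List.mem_of_getLast? hg)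
          simpa [hg] using this
      have hred : (match 0 :: (pvIdxs ls).map (· + 1) with
          | [] => ([] : List String)
          | i0 :: rest => pvSetLast (PySem.List.slice (l :: ls) (some i0) (some ((i0 :: rest).getLast?.getD 0 + 1))))
          = pvSetLast (PySem.List.slice (l :: ls) (some 0) (some ((0 :: (pvIdxs ls).map (· + 1)).getLast?.getD 0 + 1))) := rfl
      rw [hred, PySem.List.slice_toNat _ (by omega) (by omega)]
      have : ((0 :: (pvIdxs ls).map (· + 1)).getLast?.getD 0 + 1).toNat
           = ((0 :: (pvIdxs ls).map (· + 1)).getLast?.getD 0).toNat + 1 := by omega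
      simp [this]

-- ===== VERDICT (by name: the statement is the Claim_ definition above) =====
theorem clean_cell_spec : Claim_equal_clean_cell := by
  intro cell _ _
  unfold Spec_clean_cell clean_cell clean_cell_alt
  exact List.map_congr_left (fun kv _ => by rw [pvTrim_eq])
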